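-- pv_equiv track=rewrite | github.com/anantgupta2/Collatz-Conjecture | collatz_numerator_denominator.py | coll_num
-- ===== SOURCE A (Python) =====
-- def coll_num(up,dn):
--     if len(up)!=len(dn):
--         raise Exception ('l1 and l2 must have same length')
--     tot_sum=0
--     pow_2=1
--     pow_3=3**(sum(up))
--     for i in range(len(up)):
--         pow_3//=3**(up[i])
--         iter_sum=pow_2*pow_3*(3**up[i]-2**up[i])
--         pow_2*=2**(up[i]+dn[i])
--         tot_sum+=iter_sum
--     return(tot_sum)
-- ===== SOURCE B (Python) =====
-- def coll_num(up, dn):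
--     if len(up) != len(dn):
--         raise Exception('l1 and l2 must have same length')
--     total = 0
--     for i in range(len(up)):
--         p2 = 2 ** sum(up[j] + dn[j] for j in range(i))
--         p3 = 3 ** sum(up[i + 1:])
--         total += p2 * p3 * (3 ** up[i] - 2 ** up[i])
--     return total
-- ===== Notes on version B (the rewrite author's own statement) =====
-- stated objective: alternative
-- what changed: Replaced A's stateful loop that maintains running products pow_2/pow_3 via multiplication and floor division by a direct per-term computation: each term is rebuilt from the prefix sum of up[j]+dn[j] and the suffix sum of up, with no carried state and no floor division.
-- outside the precondition, e.g. on coll_num([-1], [0]): A returns -0.16666666666666669, B returns -0.16666666666666669; on coll_num([2, 1], [-3, 0]): A returns 15.5, B returns 15.5; on coll_num([-1, -1], [2, 4]): A returns 0.0, B returns -0.38888888888888895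
import Mathlib
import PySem

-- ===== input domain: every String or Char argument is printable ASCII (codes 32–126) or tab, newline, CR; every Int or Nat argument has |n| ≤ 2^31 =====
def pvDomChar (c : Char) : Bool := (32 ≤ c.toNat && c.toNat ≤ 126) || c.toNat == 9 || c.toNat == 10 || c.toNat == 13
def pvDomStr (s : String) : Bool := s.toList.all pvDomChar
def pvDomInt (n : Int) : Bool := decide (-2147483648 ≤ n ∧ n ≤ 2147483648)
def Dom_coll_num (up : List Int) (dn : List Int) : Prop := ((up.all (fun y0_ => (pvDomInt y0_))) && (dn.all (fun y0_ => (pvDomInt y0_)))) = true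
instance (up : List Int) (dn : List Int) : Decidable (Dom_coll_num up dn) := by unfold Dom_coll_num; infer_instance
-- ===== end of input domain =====

-- B drops A's running products pow_2/pow_3 and the floor division: each term is computed
-- directly from the prefix sum of up[j]+dn[j] and the suffix sum of up (objective: alternative).

-- ===== PORT A =====
-- A's for-loop over i with state (tot_sum, pow_2, pow_3), as structural recursion on zip up dn
def collNumGo : List (Int × Int) → Int → Int → Int → Int
  | [], tot, _, _ => tot
  | (u, d) :: rest, tot, pow2, pow3 =>
      let pow3' := PySem.Int.floordiv pow3 (3 ^ u.toNat)
      let iterSum := pow2 * pow3' * (3 ^ u.toNat - 2 ^ u.toNat)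
      collNumGo rest (tot + iterSum) (pow2 * 2 ^ (u + d).toNat) pow3'

def coll_num (up : List Int) (dn : List Int) : Int :=
  if up.length = dn.length then
    collNumGo (up.zip dn) 0 1 (3 ^ (up.sum).toNat)
  else 0  -- Python raises Exception here; excluded by Pre_

-- ===== PORT B =====
def coll_num_alt (up : List Int) (dn : List Int) : Int :=
  if up.length = dn.length then
    (List.range up.length).foldl (fun total i =>
      total +
        2 ^ (((up.zip dn).take i).foldl (fun (s : Int) (p : Int × Int) => s + (p.1 + p.2)) 0).toNat *
          3 ^ ((up.drop (i + 1)).sum).toNat *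
          (3 ^ (up.getD i 0).toNat - 2 ^ (up.getD i 0).toNat)) 0
  else 0  -- raises, excluded by Pre_

-- ===== PRECONDITION & SPEC =====
-- Pre_ excludes inputs of unequal length (A raises Exception) and inputs with a negative
-- up[i] or a negative up[i]+dn[i] before the last index, on which Python's ** yields a
-- float, so A's return value is not of the declared int type.
def Pre_coll_num (up : List Int) (dn : List Int) : Prop :=
  up.length = dn.length ∧ (∀ x ∈ up, 0 ≤ x) ∧
    (∀ p ∈ (up.zip dn).dropLast, 0 ≤ p.1 + p.2)
instance (up : List Int) (dn : List Int) : Decidable (Pre_coll_num up dn) := by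
  unfold Pre_coll_num; infer_instance
def pvWitness_coll_num : List Int × List Int := ([1, 2], [0, 1])

def Spec_coll_num (up : List Int) (dn : List Int) (out : Int) : Prop := out = coll_num_alt up dn
instance (up : List Int) (dn : List Int) (out : Int) : Decidable (Spec_coll_num up dn out) := by unfold Spec_coll_num; infer_instance

-- ===== CLAIM (what is proved, stated in full; the proofs are below) =====
def Claim_equal_coll_num : Prop := ∀ (up : List Int) (dn : List Int), Dom_coll_num up dn → Pre_coll_num up dn → Spec_coll_num up dn (coll_num up dn)

-- ===== LEMMAS AND PROOFS =====

-- common form of the sum: head term + 2^(u+d) times the tail sum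
def collF : List (Int × Int) → Int
  | [] => 0
  | (u, d) :: r =>
      3 ^ ((r.map Prod.fst).sum).toNat * (3 ^ u.toNat - 2 ^ u.toNat) +
        2 ^ (u + d).toNat * collF r

lemma collGo_eq_collF : ∀ (L : List (Int × Int)) (tot pow2 : Int),
    (∀ p ∈ L, 0 ≤ p.1) →
    collNumGo L tot pow2 (3 ^ ((L.map Prod.fst).sum).toNat) = tot + pow2 * collF L := by
  intro L
  induction L with
  | nil => intro tot pow2 _; simp [collNumGo, collF]
  | cons hd tl ih =>
      obtain ⟨u, d⟩ := hd
      intro tot pow2 hnn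
      have hu : 0 ≤ u := hnn (u, d) (by simp)
      have hS : 0 ≤ (tl.map Prod.fst).sum :=
        List.sum_nonneg (by
          intro x hx
          obtain ⟨p, hp, rfl⟩ := List.mem_map.mp hx
          exact hnn p (List.mem_cons_of_mem _ hp))
      have hsplit : ((u + (tl.map Prod.fst).sum).toNat) = u.toNat + ((tl.map Prod.fst).sum).toNat := by
        omega
      have hdiv : PySem.Int.floordiv (3 ^ (u + (tl.map Prod.fst).sum).toNat) (3 ^ u.toNat)
          = 3 ^ ((tl.map Prod.fst).sum).toNat := by
        rw [hsplit, pow_add,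
          PySem.Int.floordiv_eq_ediv_of_pos (by positivity : (0:Int) < 3 ^ u.toNat)]
        exact Int.mul_ediv_cancel_left _ (by positivity)
      simp only [List.map_cons, List.sum_cons, collNumGo, hdiv]
      rw [ih _ _ (fun p hp => hnn p (List.mem_cons_of_mem _ hp))]
      simp only [collF]; ring

lemma sum_take_nonneg (L : List (Int × Int)) (i : Nat) (hi : i + 1 ≤ L.length)
    (h : ∀ p ∈ L.dropLast, 0 ≤ p.1 + p.2) :
    0 ≤ ((L.take i).map (fun (p : Int × Int) => p.1 + p.2)).sum := by
  apply List.sum_nonneg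
  intro x hx
  obtain ⟨p, hp, rfl⟩ := List.mem_map.mp hx
  apply h
  rw [List.dropLast_eq_take]
  have : L.take i = (L.take (L.length - 1)).take i := by
    rw [List.take_take]; congr 1; omega
  rw [this] at hp
  exact List.take_subset _ _ hp

lemma bsum_eq_collF : ∀ (up dn : List Int), up.length = dn.length →
    (∀ p ∈ (up.zip dn).dropLast, 0 ≤ p.1 + p.2) →
    ((List.range up.length).map (fun i =>
        2 ^ (((up.zip dn).take i).map (fun (p : Int × Int) => p.1 + p.2)).sum.toNat *
          3 ^ ((up.drop (i + 1)).sum).toNat *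
          (3 ^ (up.getD i 0).toNat - 2 ^ (up.getD i 0).toNat))).sum
      = collF (up.zip dn) := by
  intro up
  induction up with
  | nil => intro dn _ _; simp [collF]
  | cons u us ih =>
      intro dn hlen hdl
      cases dn with
      | nil => simp at hlen
      | cons d ds =>
          have hlen' : us.length = ds.length := by simpa using hlen
          simp only [List.zip_cons_cons] at hdl ⊢
          have hdl' : ∀ p ∈ (us.zip ds).dropLast, 0 ≤ p.1 + p.2 := by
            intro p hp
            by_cases hz : us.zip ds = []
            · rw [hz] at hp; simp at hp
            · apply hdl
              rw [List.dropLast_cons_of_ne_nil hz]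
              exact List.mem_cons_of_mem _ hp
          simp only [List.length_cons, List.range_succ_eq_map, List.map_cons, List.map_map,
            List.sum_cons]
          have htail :
              (List.range us.length).map
                  ((fun i =>
                    2 ^ ((((u, d) :: us.zip ds).take i).map (fun (p : Int × Int) => p.1 + p.2)).sum.toNat *
                      3 ^ (((u :: us).drop (i + 1)).sum).toNat *
                      (3 ^ ((u :: us).getD i 0).toNat - 2 ^ ((u :: us).getD i 0).toNat)) ∘ Nat.succ)
                = (List.range us.length).map (fun i =>
                    (2:Int) ^ (u + d).toNat *
                      (2 ^ (((us.zip ds).take i).map (fun (p : Int × Int) => p.1 + p.2)).sum.toNat *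
                        3 ^ ((us.drop (i + 1)).sum).toNat *
                        (3 ^ (us.getD i 0).toNat - 2 ^ (us.getD i 0).toNat))) := by
            apply List.map_congr_left
            intro i hi
            have hi' : i < us.length := List.mem_range.mp hi
            have hiz : i + 1 ≤ (us.zip ds).length := by
              rw [List.length_zip]; omega
            have hud : 0 ≤ u + d := by
              apply hdl (u, d)
              have hne : us.zip ds ≠ [] := by
                intro hc; rw [hc] at hiz; simp at hiz
              rw [List.dropLast_cons_of_ne_nil hne]
              exact List.mem_cons_self
            have hS := sum_take_nonneg (us.zip ds) i hiz hdl'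
            simp only [Function.comp, List.take_succ_cons, List.map_cons, List.sum_cons,
              List.drop_succ_cons, List.getD_cons_succ]
            have : ((u + d) + (((us.zip ds).take i).map (fun (p : Int × Int) => p.1 + p.2)).sum).toNat
                = (u + d).toNat + (((us.zip ds).take i).map (fun (p : Int × Int) => p.1 + p.2)).sum.toNat := by
              omega
            rw [this, pow_add]; ring
          rw [htail]
          have hfactor :
              ((List.range us.length).map (fun i =>
                  (2:Int) ^ (u + d).toNat *
                    (2 ^ (((us.zip ds).take i).map (fun (p : Int × Int) => p.1 + p.2)).sum.toNat *
                      3 ^ ((us.drop (i + 1)).sum).toNat *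
                      (3 ^ (us.getD i 0).toNat - 2 ^ (us.getD i 0).toNat)))).sum
              = (2:Int) ^ (u + d).toNat *
                  ((List.range us.length).map (fun i =>
                    (2:Int) ^ (((us.zip ds).take i).map (fun (p : Int × Int) => p.1 + p.2)).sum.toNat *
                      3 ^ ((us.drop (i + 1)).sum).toNat *
                      (3 ^ (us.getD i 0).toNat - 2 ^ (us.getD i 0).toNat))).sum := by
            rw [← List.sum_map_mul_left]
          rw [hfactor, ih ds hlen' hdl']
          simp [collF, List.map_fst_zip (le_of_eq hlen')]

-- ===== VERDICT (by name: the statement is the Claim_ definition above) =====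
theorem coll_num_spec : Claim_equal_coll_num := by
  intro up dn _ hpre
  obtain ⟨hlen, hup, hdl⟩ := hpre
  unfold Spec_coll_num coll_num coll_num_alt
  rw [if_pos hlen, if_pos hlen]
  have hfst : (up.zip dn).map Prod.fst = up := List.map_fst_zip (le_of_eq hlen)
  have hA : collNumGo (up.zip dn) 0 1 (3 ^ (up.sum).toNat) = collF (up.zip dn) := by
    have h := collGo_eq_collF (up.zip dn) 0 1 (by
      intro p hp
      exact hup p.1 (List.of_mem_zip hp).1)
    rw [hfst] at h
    simpa using h
  have hB : (List.range up.length).foldl (fun total i =>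
      total +
        2 ^ (((up.zip dn).take i).foldl (fun (s : Int) (p : Int × Int) => s + (p.1 + p.2)) 0).toNat *
          3 ^ ((up.drop (i + 1)).sum).toNat *
          (3 ^ (up.getD i 0).toNat - 2 ^ (up.getD i 0).toNat)) 0
      = collF (up.zip dn) := by
    have hpref : ∀ i : Nat, ((up.zip dn).take i).foldl (fun (s : Int) (p : Int × Int) => s + (p.1 + p.2)) 0
        = (((up.zip dn).take i).map (fun (p : Int × Int) => p.1 + p.2)).sum := by
      intro i
      have := PySem.List.foldl_add (l := (up.zip dn).take i)
        (g := fun (p : Int × Int) => p.1 + p.2) (a := 0)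
      simpa using this
    have := PySem.List.foldl_add (l := List.range up.length)
      (g := fun i =>
        2 ^ (((up.zip dn).take i).foldl (fun (s : Int) (p : Int × Int) => s + (p.1 + p.2)) 0).toNat *
          3 ^ ((up.drop (i + 1)).sum).toNat *
          (3 ^ (up.getD i 0).toNat - 2 ^ (up.getD i 0).toNat)) (a := 0)
    rw [this]
    simp only [hpref, zero_add]
    exact bsum_eq_collF up dn hlen hdl
  rw [hA, hB]
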